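-- pv_equiv track=rewrite | github.com/Larbino1/audio_modem | playground.py | get_envelope
-- ===== SOURCE A (Python) =====
-- def get_envelope(data, bin_count):
--     """ Returns the envelope of a set of data"""
--     bin_width = len(data) // bin_count
--     mags = [0] * bin_count
--     for i in range(bin_count):
--         for val in data[i * bin_width: (i + 1) * bin_width]:
--             if abs(val) > mags[i]:
--                 mags[i] = abs(val)
--     return mags
-- ===== SOURCE B (Python) =====
-- def get_envelope(data, bin_count):
--     """Envelope via one flat pass: bin index derived from position (no slicing)."""
--     bin_width = len(data) // bin_count
--     mags = [0] * bin_count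
--     if bin_width > 0:
--         for idx, val in enumerate(data):
--             b = idx // bin_width
--             if b < bin_count:
--                 m = -val if val < 0 else val
--                 if m > mags[b]:
--                     mags[b] = m
--     return mags
-- ===== Notes on version B (the rewrite author's own statement) =====
-- stated objective: alternative
-- what changed: Replaces the nested loop over bins with per-bin slice copies by a single flat pass over the data, deriving each element's bin index from its position (idx // bin_width) and skipping the trailing remainder; no slices are materialised.
import Mathlib
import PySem

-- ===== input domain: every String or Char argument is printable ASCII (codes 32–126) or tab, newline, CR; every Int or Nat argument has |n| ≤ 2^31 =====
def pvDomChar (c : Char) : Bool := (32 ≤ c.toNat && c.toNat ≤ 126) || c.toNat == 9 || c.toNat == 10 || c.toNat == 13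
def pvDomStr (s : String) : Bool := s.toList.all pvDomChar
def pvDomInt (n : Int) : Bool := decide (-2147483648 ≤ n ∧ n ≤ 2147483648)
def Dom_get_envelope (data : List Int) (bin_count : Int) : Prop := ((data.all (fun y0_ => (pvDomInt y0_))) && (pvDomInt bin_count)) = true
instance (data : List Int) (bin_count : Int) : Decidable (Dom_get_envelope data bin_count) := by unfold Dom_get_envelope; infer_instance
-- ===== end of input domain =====

-- B replaces A's nested per-bin slice loops by one flat pass deriving the bin index from the position (alternative decomposition, same cost).

-- ===== PORT A =====
def get_envelope (data : List Int) (bin_count : Int) : List Int :=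
  let bin_width := PySem.Int.floordiv (data.length : Int) bin_count
  let mags := List.replicate bin_count.toNat (0 : Int)
  (PySem.List.pyRange 0 bin_count 1).foldl (fun mags i =>
    (PySem.List.slice data (some (i * bin_width)) (some ((i + 1) * bin_width))).foldl
      (fun mags val =>
        if |val| > PySem.List.pyGetD mags i 0 then PySem.List.pySetD mags i |val| else mags)
      mags) mags

-- ===== PORT B =====
def get_envelope_alt (data : List Int) (bin_count : Int) : List Int :=
  let bin_width := PySem.Int.floordiv (data.length : Int) bin_count
  let mags := List.replicate bin_count.toNat (0 : Int)
  if bin_width > 0 then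
    (PySem.List.enumerate data).foldl (fun mags p =>
      let b := PySem.Int.floordiv p.1 bin_width
      if b < bin_count then
        let m := if p.2 < 0 then -p.2 else p.2
        if m > PySem.List.pyGetD mags b 0 then PySem.List.pySetD mags b m else mags
      else mags) mags
  else mags

-- ===== PRECONDITION & SPEC =====
-- Pre_ excludes only bin_count = 0, on which Python A raises ZeroDivisionError (len(data) // 0); B raises there too.
def Pre_get_envelope (data : List Int) (bin_count : Int) : Prop := bin_count ≠ 0
instance (data : List Int) (bin_count : Int) : Decidable (Pre_get_envelope data bin_count) := by unfold Pre_get_envelope; infer_instance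
def pvWitness_get_envelope : List Int × Int := ([1, -2, 3], 2)

def Spec_get_envelope (data : List Int) (bin_count : Int) (out : List Int) : Prop := out = get_envelope_alt data bin_count
instance (data : List Int) (bin_count : Int) (out : List Int) : Decidable (Spec_get_envelope data bin_count out) := by unfold Spec_get_envelope; infer_instance

-- ===== CLAIM (what is proved, stated in full; the proofs are below) =====
def Claim_equal_get_envelope : Prop := ∀ (data : List Int) (bin_count : Int), Dom_get_envelope data bin_count → Pre_get_envelope data bin_count → Spec_get_envelope data bin_count (get_envelope data bin_count)

-- ===== LEMMAS AND PROOFS =====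

-- the common shape both programs reduce to: per bin k, the running max of |·| over that bin's chunk
def pvBinmax (a : Int) (l : List Int) : Int := l.foldl (fun a v => max a |v|) a
def pvChunk (data : List Int) (bw k : Nat) : List Int := (data.drop (k * bw)).take bw
def pvSpec (data : List Int) (bw bc : Nat) : List Int :=
  (List.range bc).map (fun k => pvBinmax 0 (pvChunk data bw k))

-- B's loop body, named so the fold lemmas can mention it (definitionally the port's lambda)
def pvBstep (bin_width bin_count : Int) (mags : List Int) (p : Int × Int) : List Int :=
  let b := PySem.Int.floordiv p.1 bin_width
  if b < bin_count then
    let m := if p.2 < 0 then -p.2 else p.2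
    if m > PySem.List.pyGetD mags b 0 then PySem.List.pySetD mags b m else mags
  else mags

lemma pvB_unfold (data : List Int) (bin_count : Int) :
    get_envelope_alt data bin_count =
      (if PySem.Int.floordiv (data.length : Int) bin_count > 0 then
        (PySem.List.enumerate data).foldl
          (pvBstep (PySem.Int.floordiv (data.length : Int) bin_count) bin_count)
          (List.replicate bin_count.toNat 0)
      else List.replicate bin_count.toNat 0) := rfl

lemma pv_abs_ite (v : Int) : (if v < 0 then -v else v) = |v| := by
  rcases le_or_gt 0 v with h | h
  · rw [if_neg (by omega), abs_of_nonneg h]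
  · rw [if_pos h, abs_of_neg h]

-- folding the conditional-update over one chunk is a single set to the running max
lemma pv_fold_simple (i : Nat) (chunk : List Int) : ∀ (mags : List Int), i < mags.length →
    chunk.foldl (fun m w => if |w| > m.getD i 0 then m.set i |w| else m) mags
      = mags.set i (chunk.foldl (fun a w => max a |w|) (mags.getD i 0)) := by
  induction chunk with
  | nil =>
    intro mags h
    rw [List.foldl_nil, List.foldl_nil, List.getD_eq_getElem _ 0 h, List.set_getElem_self h]
  | cons v t IH =>
    intro mags h
    simp only [List.foldl_cons]
    by_cases hc : |v| > mags.getD i 0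
    · have h1 : (mags.set i |v|).getD i 0 = |v| := by
        rw [List.getD_eq_getElem _ 0 (by simpa using h)]; simp
      rw [if_pos hc, IH _ (by simpa using h), List.set_set, h1, max_eq_right hc.le]
    · rw [if_neg hc, IH _ h, max_eq_left (by omega)]

-- the invariant state after finishing k bins
lemma pv_state_getD (g : Nat → Int) (bc k : Nat) (h : k < bc) :
    ((List.range k).map g ++ List.replicate (bc - k) (0 : Int)).getD k 0 = 0 := by
  rw [List.getD_append_right _ _ _ _ (by simp)]
  have h1 : k - ((List.range k).map g).length = 0 := by simp
  rw [h1]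
  have h2 : bc - k = (bc - k - 1) + 1 := by omega
  rw [h2, List.replicate_succ]
  rfl

lemma pv_state_set (g : Nat → Int) (bc k : Nat) (h : k < bc) :
    ((List.range k).map g ++ List.replicate (bc - k) (0 : Int)).set k (g k)
      = (List.range (k + 1)).map g ++ List.replicate (bc - (k + 1)) 0 := by
  have hrep : List.replicate (bc - k) (0 : Int) = 0 :: List.replicate (bc - (k + 1)) 0 := by
    rw [← List.replicate_succ]; congr 1; omega
  rw [hrep, List.set_append_right _ _ (by simp)]
  simp [List.range_succ]

-- ===== A's loop =====
lemma pvA_fold (data : List Int) (bw bc : Nat) : ∀ k, k ≤ bc →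
    (PySem.List.pyRange 0 (k : Int) 1).foldl (fun mags i =>
      (PySem.List.slice data (some (i * (bw : Int))) (some ((i + 1) * (bw : Int)))).foldl
        (fun mags val =>
          if |val| > PySem.List.pyGetD mags i 0 then PySem.List.pySetD mags i |val| else mags)
        mags) (List.replicate bc 0)
    = (List.range k).map (fun j => pvBinmax 0 (pvChunk data bw j)) ++ List.replicate (bc - k) 0 := by
  intro k
  induction k with
  | zero =>
    intro _
    rw [PySem.List.pyRange_one_eq_nil (by norm_num)]
    simp
  | succ k IH =>
    intro hk1
    have hk : k < bc := hk1
    have hcast : ((k + 1 : Nat) : Int) = (k : Int) + 1 := by push_cast; ring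
    rw [hcast, PySem.List.pyRange_one_succ_right (by positivity), List.foldl_append,
      IH hk.le, List.foldl_cons, List.foldl_nil]
    have h1 : ((k : Int) * (bw : Int)) = ((k * bw : Nat) : Int) := by push_cast; ring
    have h2 : (((k : Int)) + 1) * (bw : Int) = ((k * bw : Nat) : Int) + ((bw : Nat) : Int) := by
      push_cast; ring
    rw [h1, h2, PySem.List.slice_natCast_add]
    simp only [PySem.List.pyGetD_natCast, PySem.List.pySetD_natCast]
    have hlen : ((List.range k).map (fun j => pvBinmax 0 (pvChunk data bw j))
        ++ List.replicate (bc - k) (0 : Int)).length = bc := by simp; omega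
    rw [pv_fold_simple k _ _ (by rw [hlen]; exact hk), pv_state_getD _ _ _ hk]
    exact pv_state_set _ _ _ hk

lemma pvA_char (data : List Int) (bc : Nat) :
    get_envelope data (bc : Int) = pvSpec data (data.length / bc) bc := by
  simp only [get_envelope, PySem.Int.floordiv_natCast, Int.toNat_natCast]
  have := pvA_fold data (data.length / bc) bc bc (le_refl bc)
  simp only [Nat.sub_self, List.replicate_zero, List.append_nil] at this
  exact this

-- ===== B's loop =====
lemma pvB_chunk (bw bc k : Nat) (hk : k < bc) (ys : List Int) :
    ∀ (s : Nat) (mags : List Int), k * bw ≤ s → s + ys.length ≤ (k + 1) * bw →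
    (PySem.List.enumerate ys (s : Int)).foldl (pvBstep (bw : Int) (bc : Int)) mags
      = ys.foldl (fun m w => if |w| > m.getD k 0 then m.set k |w| else m) mags := by
  induction ys with
  | nil => intro s mags _ _; rw [PySem.List.enumerate_nil]; rfl
  | cons v t IH =>
    intro s mags h1 h2
    rw [PySem.List.enumerate_cons, List.foldl_cons, List.foldl_cons]
    have hdiv : PySem.Int.floordiv (s : Int) (bw : Int) = ((k : Nat) : Int) := by
      rw [PySem.Int.floordiv_natCast]
      norm_cast
      exact Nat.div_eq_of_lt_le h1 (by simp at h2 ⊢; omega)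
    have hstep : pvBstep (bw : Int) (bc : Int) mags ((s : Int), v)
        = (if |v| > mags.getD k 0 then mags.set k |v| else mags) := by
      simp only [pvBstep, hdiv, pv_abs_ite, PySem.List.pyGetD_natCast, PySem.List.pySetD_natCast]
      rw [if_pos (by exact_mod_cast hk)]
    rw [hstep]
    have hc1 : ((s : Int) + 1) = ((s + 1 : Nat) : Int) := by push_cast; ring
    rw [hc1, IH (s + 1) _ (by omega) (by simp at h2 ⊢; omega)]

lemma pvB_skip (bw bc : Nat) (hbw : 0 < bw) (ys : List Int) :
    ∀ (s : Nat) (mags : List Int), bc * bw ≤ s →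
    (PySem.List.enumerate ys (s : Int)).foldl (pvBstep (bw : Int) (bc : Int)) mags = mags := by
  induction ys with
  | nil => intro s mags _; rw [PySem.List.enumerate_nil]; rfl
  | cons v t IH =>
    intro s mags h
    rw [PySem.List.enumerate_cons, List.foldl_cons]
    have hstep : pvBstep (bw : Int) (bc : Int) mags ((s : Int), v) = mags := by
      simp only [pvBstep, PySem.Int.floordiv_natCast]
      rw [if_neg]
      push Not
      exact_mod_cast (Nat.le_div_iff_mul_le hbw).mpr (by omega)
    rw [hstep]
    have hc1 : ((s : Int) + 1) = ((s + 1 : Nat) : Int) := by push_cast; ring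
    rw [hc1, IH (s + 1) _ (by omega)]

lemma pv_enumerate_append (xs : List Int) : ∀ (ys : List Int) (s : Int),
    PySem.List.enumerate (xs ++ ys) s
      = PySem.List.enumerate xs s ++ PySem.List.enumerate ys (s + xs.length) := by
  induction xs with
  | nil => intro ys s; simp [PySem.List.enumerate_nil]
  | cons x t IH =>
    intro ys s
    rw [List.cons_append, PySem.List.enumerate_cons, PySem.List.enumerate_cons, IH,
      List.cons_append]
    congr 2
    simp only [List.length_cons]
    push_cast
    ring

lemma pvB_take_fold (data : List Int) (bw bc : Nat) : ∀ k, k ≤ bc →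
    k * bw ≤ data.length →
    (PySem.List.enumerate (data.take (k * bw)) 0).foldl
        (pvBstep (bw : Int) (bc : Int)) (List.replicate bc 0)
      = (List.range k).map (fun j => pvBinmax 0 (pvChunk data bw j)) ++ List.replicate (bc - k) 0 := by
  intro k
  induction k with
  | zero => intro _ _; rw [Nat.zero_mul, List.take_zero, PySem.List.enumerate_nil]; simp
  | succ k IH =>
    intro hk hlen
    have hk' : k < bc := hk
    have hklen : k * bw ≤ data.length := by
      calc k * bw ≤ (k + 1) * bw := Nat.mul_le_mul_right _ (by omega)
        _ ≤ data.length := hlen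
    have hsplit : (k + 1) * bw = k * bw + bw := by ring
    rw [hsplit, List.take_add, pv_enumerate_append, List.foldl_append, IH hk'.le hklen]
    have hlen1 : (data.take (k * bw)).length = k * bw := by
      rw [List.length_take]; omega
    have hs : (0 : Int) + ((data.take (k * bw)).length : Int) = ((k * bw : Nat) : Int) := by
      rw [hlen1]; ring
    rw [hs, pvB_chunk bw bc k hk' _ (k * bw) _ (le_refl _)
      (by have := List.length_take_le bw (data.drop (k * bw)); omega)]
    have hlen2 : ((List.range k).map (fun j => pvBinmax 0 (pvChunk data bw j))
        ++ List.replicate (bc - k) (0 : Int)).length = bc := by simp; omega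
    rw [pv_fold_simple k _ _ (by rw [hlen2]; exact hk'), pv_state_getD _ _ _ hk']
    exact pv_state_set _ _ _ hk'

lemma pvB_char (data : List Int) (bc : Nat) :
    get_envelope_alt data (bc : Int) = pvSpec data (data.length / bc) bc := by
  rw [pvB_unfold]
  simp only [PySem.Int.floordiv_natCast, Int.toNat_natCast]
  by_cases h : 0 < data.length / bc
  · rw [if_pos (by exact_mod_cast h)]
    have hbcbw : bc * (data.length / bc) ≤ data.length := by
      rw [Nat.mul_comm]; exact Nat.div_mul_le_self _ _
    have hdata : PySem.List.enumerate data (0 : Int)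
        = PySem.List.enumerate (data.take (bc * (data.length / bc))) 0
          ++ PySem.List.enumerate (data.drop (bc * (data.length / bc)))
              ((0 : Int) + ((data.take (bc * (data.length / bc))).length : Int)) := by
      conv_lhs => rw [← List.take_append_drop (bc * (data.length / bc)) data]
      rw [pv_enumerate_append]
    rw [hdata, List.foldl_append]
    have := pvB_take_fold data (data.length / bc) bc bc (le_refl bc) hbcbw
    rw [this]
    have hlen1 : ((data.take (bc * (data.length / bc))).length : Int)
        = ((bc * (data.length / bc) : Nat) : Int) := by
      rw [List.length_take]; congr 1; omega
    have hs : (0 : Int) + ((data.take (bc * (data.length / bc))).length : Int)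
        = ((bc * (data.length / bc) : Nat) : Int) := by rw [hlen1]; ring
    rw [hs, pvB_skip (data.length / bc) bc h _ _ _ (le_refl _)]
    simp [pvSpec]
  · rw [if_neg (by exact_mod_cast h)]
    have hbw0 : data.length / bc = 0 := Nat.eq_zero_of_not_pos h
    rw [hbw0]
    simp [pvSpec, pvChunk, pvBinmax, List.map_const']
-- note: enumerate's default start is 0, matching pvB_take_fold's literal 0

lemma pv_floordiv_nonpos (n : Nat) (b : Int) (hb : b < 0) : PySem.Int.floordiv (n : Int) b ≤ 0 := by
  have h1 := PySem.Int.floordiv_mul_add_mod (n : Int) b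
  have h2 := PySem.Int.mod_neg_bounds (a := (n : Int)) hb
  by_contra hc
  push Not at hc
  nlinarith [Int.natCast_nonneg n]

lemma pv_neg_case (data : List Int) (bin_count : Int) (h : bin_count < 0) :
    get_envelope data bin_count = [] ∧ get_envelope_alt data bin_count = [] := by
  constructor
  · simp only [get_envelope, Int.toNat_of_nonpos h.le, List.replicate_zero,
      PySem.List.pyRange_one_eq_nil h.le, List.foldl_nil]
  · rw [pvB_unfold, if_neg (by
      have := pv_floordiv_nonpos data.length bin_count h
      omega)]
    simp [Int.toNat_of_nonpos h.le]

-- ===== VERDICT (by name: the statement is the Claim_ definition above) =====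
theorem get_envelope_spec : Claim_equal_get_envelope := by
  intro data bin_count _ hpre
  unfold Spec_get_envelope
  rcases lt_trichotomy bin_count 0 with h | h | h
  · rcases pv_neg_case data bin_count h with ⟨ha, hb⟩; rw [ha, hb]
  · exact absurd h hpre
  · have hbc : bin_count = ((bin_count.toNat : Nat) : Int) := (Int.toNat_of_nonneg h.le).symm
    rw [hbc, pvA_char data _, pvB_char data _]
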